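-- pv_equiv track=rewrite | github.com/alansammarone/FractalArt | log.py | McNuggets
-- ===== SOURCE A (Python) =====
-- def McNuggets(n):
--
--
-- 	a = 0
-- 	b = 0
-- 	c = 0
--
-- 	for a in range(n):
-- 		for b in range(n):
-- 			for c in range(n):
-- 				if 6*a + 9*b + 20*c == n:
-- 					return True
--
--
-- 	return False
-- ===== SOURCE B (Python) =====
-- def McNuggets(n):
--     if n < 0:
--         return False
--     for c in range(n // 20 + 1):
--         r = n - 20 * c
--         for b in range(r // 9 + 1):
--             if (r - 9 * b) % 6 == 0:
--                 return True
--     return False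
-- ===== Notes on version B (the rewrite author's own statement) =====
-- stated objective: faster
-- what changed: Replace the O(n^3) triple brute-force scan over a,b,c<n by iterating only c up to n//20 and b up to the remainder//9 and testing divisibility of the remainder by 6, so the innermost loop disappears.
-- intended difference: For n=0 A returns False because range(0) is empty, while B returns True; 0 = 6*0+9*0+20*0 is trivially expressible, so B's value is the intended one. — e.g. on McNuggets(0): A returns false, B returns true
import Mathlib
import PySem

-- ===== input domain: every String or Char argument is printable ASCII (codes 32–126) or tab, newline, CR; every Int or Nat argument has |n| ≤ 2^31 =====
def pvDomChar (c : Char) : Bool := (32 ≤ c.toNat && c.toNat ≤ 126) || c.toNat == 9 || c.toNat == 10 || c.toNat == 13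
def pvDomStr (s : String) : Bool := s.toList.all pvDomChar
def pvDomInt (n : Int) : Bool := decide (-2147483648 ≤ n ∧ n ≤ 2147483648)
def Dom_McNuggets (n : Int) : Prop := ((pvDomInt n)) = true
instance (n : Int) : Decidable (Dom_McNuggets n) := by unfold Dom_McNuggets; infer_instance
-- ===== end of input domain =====

-- B replaces A's O(n^3) triple scan by a two-level search (c up to n//20, b up to the
-- remainder//9, then a divisibility-by-6 test); on n = 0 B returns the intended True (see D_).

-- ===== PORT A =====
-- triple 'for … in range(n)' with early 'return True' = nested List.any over pyRange
def McNuggets (n : Int) : Bool :=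
  (PySem.List.pyRange 0 n 1).any (fun a =>
    (PySem.List.pyRange 0 n 1).any (fun b =>
      (PySem.List.pyRange 0 n 1).any (fun c =>
        6*a + 9*b + 20*c == n)))

-- ===== PORT B =====
def McNuggets_alt (n : Int) : Bool :=
  if n < 0 then false
  else
    (PySem.List.pyRange 0 (PySem.Int.floordiv n 20 + 1) 1).any (fun c =>
      let r := n - 20*c
      (PySem.List.pyRange 0 (PySem.Int.floordiv r 9 + 1) 1).any (fun b =>
        PySem.Int.mod (r - 9*b) 6 == 0))

-- ===== PRECONDITION & SPEC =====
-- For n = 0, A returns False (range(0) is empty) while B returns True; 0 = 6*0+9*0+20*0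
-- is trivially expressible, so B's value is the intended one.
def D_McNuggets (n : Int) : Prop := n = 0
instance (n : Int) : Decidable (D_McNuggets n) := by unfold D_McNuggets; infer_instance

def Spec_McNuggets (n : Int) (out : Bool) : Prop := ¬ D_McNuggets n → out = McNuggets_alt n
instance (n : Int) (out : Bool) : Decidable (Spec_McNuggets n out) := by unfold Spec_McNuggets; infer_instance

def pvDiffWitness_McNuggets : Int := 0
def pvDiffWitnessOut_McNuggets : Bool × Bool := (false, true)

-- ===== CLAIM =====
def Claim_unchanged_McNuggets : Prop := ∀ (n : Int), Dom_McNuggets n → Spec_McNuggets n (McNuggets n)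
def Claim_changed_McNuggets : Prop := Dom_McNuggets (pvDiffWitness_McNuggets) ∧ D_McNuggets (pvDiffWitness_McNuggets) ∧ McNuggets (pvDiffWitness_McNuggets) = pvDiffWitnessOut_McNuggets.1 ∧ McNuggets_alt (pvDiffWitness_McNuggets) = pvDiffWitnessOut_McNuggets.2 ∧ pvDiffWitnessOut_McNuggets.1 ≠ pvDiffWitnessOut_McNuggets.2
def Claim_exact_McNuggets : Prop := ∀ (n : Int), Dom_McNuggets n → D_McNuggets n → McNuggets n ≠ McNuggets_alt n

-- ===== LEMMAS AND PROOFS =====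

lemma McNuggets_iff (n : Int) (hn : 0 < n) :
    McNuggets n = true ↔ ∃ a b c : Int, 0 ≤ a ∧ 0 ≤ b ∧ 0 ≤ c ∧ 6*a + 9*b + 20*c = n := by
  simp only [McNuggets, List.any_eq_true, PySem.List.mem_pyRange_one, beq_iff_eq]
  constructor
  · rintro ⟨a, ⟨ha0, _⟩, b, ⟨hb0, _⟩, c, ⟨hc0, _⟩, h⟩
    exact ⟨a, b, c, ha0, hb0, hc0, h⟩
  · rintro ⟨a, b, c, ha0, hb0, hc0, h⟩
    exact ⟨a, ⟨ha0, by omega⟩, b, ⟨hb0, by omega⟩, c, ⟨hc0, by omega⟩, h⟩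

lemma McNuggets_alt_iff (n : Int) (hn : 0 ≤ n) :
    McNuggets_alt n = true ↔ ∃ a b c : Int, 0 ≤ a ∧ 0 ≤ b ∧ 0 ≤ c ∧ 6*a + 9*b + 20*c = n := by
  simp only [McNuggets_alt, if_neg (by omega : ¬ n < 0), List.any_eq_true,
    PySem.List.mem_pyRange_one, beq_iff_eq]
  constructor
  · rintro ⟨c, ⟨hc0, hc1⟩, b, ⟨hb0, hb1⟩, hmod⟩
    have hc : c * 20 ≤ n := (PySem.Int.le_floordiv_iff_mul_le (by omega)).1 (by omega)
    have hb : b * 9 ≤ n - 20*c := (PySem.Int.le_floordiv_iff_mul_le (by omega)).1 (by omega)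
    obtain ⟨a, ha⟩ := (PySem.Int.mod_eq_zero_iff_dvd _ _).1 hmod
    exact ⟨a, b, c, by omega, hb0, hc0, by omega⟩
  · rintro ⟨a, b, c, ha0, hb0, hc0, h⟩
    refine ⟨c, ⟨hc0, ?_⟩, b, ⟨hb0, ?_⟩, ?_⟩
    · have hcle : c ≤ PySem.Int.floordiv n 20 :=
        (PySem.Int.le_floordiv_iff_mul_le (by omega)).2 (by omega)
      omega
    · have hble : b ≤ PySem.Int.floordiv (n - 20*c) 9 :=
        (PySem.Int.le_floordiv_iff_mul_le (by omega)).2 (by omega)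
      omega
    · exact (PySem.Int.mod_eq_zero_iff_dvd _ _).2 ⟨a, by omega⟩

lemma McNuggets_neg (n : Int) (hn : n < 0) : McNuggets n = false := by
  simp [McNuggets, PySem.List.pyRange_one]
  intros
  omega

-- ===== VERDICT =====
theorem McNuggets_spec : Claim_unchanged_McNuggets := by
  intro n _ hD
  rcases lt_trichotomy n 0 with h | h | h
  · rw [McNuggets_neg n h, McNuggets_alt, if_pos h]
  · exact absurd h hD
  · rw [Bool.eq_iff_iff, McNuggets_iff n h, McNuggets_alt_iff n (le_of_lt h)]

theorem McNuggets_changed : Claim_changed_McNuggets := by unfold Claim_changed_McNuggets; decide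

theorem McNuggets_tight : Claim_exact_McNuggets := by
  intro n _ hD
  subst hD
  decide
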